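-- pv_equiv track=rewrite | github.com/flabbyninja/wordler | mapper.py | calc_letter_frequency
-- ===== SOURCE A (Python) =====
-- import collections
--
-- def calc_letter_frequency(word_list, floating_letters, locked_letters, remove_known=False):
--     # build one string of all characters from potential valid words
--     response_for_collection = ''
--     for word in word_list:
--         response_for_collection += word
--
--     if remove_known:
--         # Assemble all letters that are already known
--         total_to_remove = floating_letters + locked_letters
--         total_to_remove = total_to_remove.replace('_', '')
--
--         # remove known from all characters to give those that should be guessed
--         for l in total_to_remove:
--             response_for_collection = response_for_collection.replace(l, '')
--
--     return collections.Counter(response_for_collection)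
-- ===== SOURCE B (Python) =====
-- def calc_letter_frequency(word_list, floating_letters, locked_letters, remove_known=False):
--     skip = set()
--     if remove_known:
--         for c in floating_letters + locked_letters:
--             if c != '_':
--                 skip.add(c)
--     counts = {}
--     for word in word_list:
--         for c in word:
--             if c not in skip:
--                 counts[c] = counts.get(c, 0) + 1
--     return counts
-- ===== Notes on version B (the rewrite author's own statement) =====
-- stated objective: alternative
-- what changed: B makes one streaming pass over the words, tallying each character into a hand-maintained dict and skipping characters found in a precomputed exclusion set, instead of A's staged string pipeline (concatenate everything, run one full replace scan per known letter, then Counter).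
import Mathlib
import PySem

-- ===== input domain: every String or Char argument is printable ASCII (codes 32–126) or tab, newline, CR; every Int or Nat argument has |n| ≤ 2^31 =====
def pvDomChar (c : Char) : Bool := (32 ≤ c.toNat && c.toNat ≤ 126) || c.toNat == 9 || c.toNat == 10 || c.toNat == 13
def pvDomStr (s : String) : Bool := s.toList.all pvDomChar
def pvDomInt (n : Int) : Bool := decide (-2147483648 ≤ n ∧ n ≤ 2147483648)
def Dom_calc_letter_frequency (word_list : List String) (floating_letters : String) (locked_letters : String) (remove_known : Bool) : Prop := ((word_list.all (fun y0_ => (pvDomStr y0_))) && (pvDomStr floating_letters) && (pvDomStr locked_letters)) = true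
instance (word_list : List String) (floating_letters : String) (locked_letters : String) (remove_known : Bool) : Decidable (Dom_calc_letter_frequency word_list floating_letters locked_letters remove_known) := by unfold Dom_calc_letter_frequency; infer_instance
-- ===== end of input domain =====

-- B tallies characters in one streaming pass over the words into a hand-maintained dict,
-- skipping members of a precomputed exclusion set, instead of A's staged pipeline
-- (concatenate all words, one full replace scan per known letter, then Counter) (objective: alternative).

-- ===== PORT A =====
-- literal port of A: concatenate words; if remove_known, strip '_' from floating+locked and
-- delete each known letter from the string via replace; then Counter over the characters.
def calc_letter_frequency (word_list : List String) (floating_letters : String) (locked_letters : String) (remove_known : Bool) : List (String × Int) :=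
  let response_for_collection : String := word_list.foldl (fun acc word => acc ++ word) ""
  let response_for_collection : String :=
    if remove_known then
      let total_to_remove := floating_letters ++ locked_letters
      let total_to_remove := PySem.Str.replace total_to_remove "_" ""
      total_to_remove.toList.foldl
        (fun r l => PySem.Str.replace r (String.singleton l) "") response_for_collection
    else response_for_collection
  (PySem.Dict.counter (response_for_collection.toList.map (fun c => String.singleton c))).items

-- ===== PORT B =====
-- literal port of B: build the skip set ('for c in floating+locked: if c != '_': skip.add(c)'),
-- then one pass 'for word in word_list: for c in word: if c not in skip: counts[c] = counts.get(c, 0) + 1'.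
def calc_letter_frequency_alt (word_list : List String) (floating_letters : String) (locked_letters : String) (remove_known : Bool) : List (String × Int) :=
  let skip : PySem.Set Char := PySem.Set.empty
  let skip : PySem.Set Char :=
    if remove_known then
      (floating_letters ++ locked_letters).toList.foldl
        (fun s c => if c == '_' then s else PySem.Set.add s c) skip
    else skip
  let counts : PySem.Dict String Int :=
    word_list.foldl
      (fun d word =>
        word.toList.foldl
          (fun d c =>
            if PySem.Set.contains skip c then d
            else d.insert (String.singleton c) (d.getD (String.singleton c) 0 + 1))
          d)
      PySem.Dict.empty
  counts.items

-- ===== PRECONDITION & SPEC =====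
def Spec_calc_letter_frequency (word_list : List String) (floating_letters : String) (locked_letters : String) (remove_known : Bool) (out : List (String × Int)) : Prop := out = calc_letter_frequency_alt word_list floating_letters locked_letters remove_known
instance (word_list : List String) (floating_letters : String) (locked_letters : String) (remove_known : Bool) (out : List (String × Int)) : Decidable (Spec_calc_letter_frequency word_list floating_letters locked_letters remove_known out) := by unfold Spec_calc_letter_frequency; infer_instance

-- ===== CLAIM (what is proved, stated in full; the proofs are below) =====
def Claim_equal_calc_letter_frequency : Prop := ∀ (word_list : List String) (floating_letters : String) (locked_letters : String) (remove_known : Bool), Dom_calc_letter_frequency word_list floating_letters locked_letters remove_known → Spec_calc_letter_frequency word_list floating_letters locked_letters remove_known (calc_letter_frequency word_list floating_letters locked_letters remove_known)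

-- ===== LEMMAS AND PROOFS =====

-- A's '+='-concatenation builds the flattened character list.
theorem pvFoldl_append_toList (ws : List String) (s : String) :
    (ws.foldl (fun acc w => acc ++ w) s).toList = s.toList ++ (ws.map String.toList).flatten := by
  induction ws generalizing s with
  | nil => simp
  | cons w ws ih => simp [ih, String.toList_append]

-- a loop that skips elements satisfying p is a fold over the filtered list
theorem pvFoldl_if_skip {α β : Type} (p : α → Bool) (f : β → α → β) (xs : List α) (b : β) :
    xs.foldl (fun b a => if p a then b else f b a) b
      = (xs.filter (fun a => !(p a))).foldl f b := by
  induction xs generalizing b with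
  | nil => rfl
  | cons x xs ih =>
    by_cases hx : p x = true <;> simp [hx, ih]

-- replace with a single-character pattern and empty replacement is a filter
theorem pvReplace_single_go (fuel : Nat) (l : Char) (s acc : List Char) (h : s.length ≤ fuel) :
    PySem.Chars.replace.go [l] [] fuel s acc = acc.reverse ++ s.filter (fun c => !(c == l)) := by
  induction fuel generalizing s acc with
  | zero =>
    cases s with
    | nil => simp [PySem.Chars.replace.go]
    | cons c t => simp at h
  | succ fuel ih =>
    cases s with
    | nil => simp [PySem.Chars.replace.go]
    | cons c t =>
      simp only [List.length_cons, Nat.succ_le_succ_iff] at h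
      by_cases hc : l = c
      · subst hc
        have hpre : List.isPrefixOf [l] (l :: t) = true := by simp [List.isPrefixOf]
        simp [PySem.Chars.replace.go, hpre, ih _ _ h]
      · have hpre : List.isPrefixOf [l] (c :: t) = false := by
          simp [List.isPrefixOf]; exact hc
        have hcl : (c == l) = false := by
          simpa using fun hh => hc hh.symm
        simp [PySem.Chars.replace.go, hpre, ih _ _ h, hcl]

theorem pvReplace_single (s : List Char) (l : Char) :
    PySem.Chars.replace s [l] [] = s.filter (fun c => !(c == l)) := by
  simpa using pvReplace_single_go s.length l s [] (Nat.le_refl _)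

-- A's removal loop filters the character list by "not a known letter"
theorem pvFoldl_replace (R : List Char) (s : String) :
    ((R.foldl (fun r l => PySem.Str.replace r (String.singleton l) "") s)).toList
      = s.toList.filter (fun c => R.all (fun l => !(c == l))) := by
  induction R generalizing s with
  | nil => simp
  | cons r R ih =>
    simp only [List.foldl_cons, ih, PySem.Str.toList_replace, String.toList_singleton]
    have h0 : (("" : String).toList) = [] := rfl
    rw [h0, pvReplace_single, List.filter_filter]
    exact List.filter_congr (fun c _ => by simp [List.all_cons, Bool.and_comm])

-- the two removal predicates agree: "no known letter equals c" = "c not in the skip set"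
theorem pvPred_eq (R : List Char) (c : Char) :
    (R.all (fun l => !(c == l))) = !(PySem.Set.contains (PySem.Set.ofList R) c) := by
  by_cases h : c ∈ R
  · have : ¬ (∀ l ∈ R, ¬ c = l) := fun hall => hall c h rfl
    simp_all [PySem.Set.mem_ofList]
  · simp_all [PySem.Set.mem_ofList]
    intro l hl he; exact h (he ▸ hl)

--per-character: B's guarded tally step is the plain counting step over the filtered characters
theorem pvTallyChars (skip : PySem.Set Char) (cs : List Char) (d : PySem.Dict String Int) :
    cs.foldl
        (fun d c =>
          if PySem.Set.contains skip c then d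
          else d.insert (String.singleton c) (d.getD (String.singleton c) 0 + 1)) d
      = ((cs.filter (fun c => !(PySem.Set.contains skip c))).map
          (fun c => String.singleton c)).foldl (fun d x => d.insert x (d.getD x 0 + 1)) d := by
  induction cs generalizing d with
  | nil => rfl
  | cons c cs ih =>
    by_cases h : PySem.Set.contains skip c = true
    · rw [List.foldl_cons, if_pos h, List.filter_cons_of_neg (by rw [h]; exact Bool.false_ne_true), ih]
    · rw [Bool.not_eq_true] at h
      rw [List.foldl_cons, if_neg (by rw [h]; exact Bool.false_ne_true), List.filter_cons_of_pos (by rw [h]; rfl),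
        List.map_cons, List.foldl_cons, ih]

-- B's nested word/char tally from a given dict is the plain counting fold over the
-- filtered flattened characters
theorem pvTallyWords (skip : PySem.Set Char) (ws : List String) (d : PySem.Dict String Int) :
    ws.foldl
        (fun d word =>
          word.toList.foldl
            (fun d c =>
              if PySem.Set.contains skip c then d
              else d.insert (String.singleton c) (d.getD (String.singleton c) 0 + 1)) d) d
      = ((((ws.map String.toList).flatten).filter
            (fun c => !(PySem.Set.contains skip c))).map
          (fun c => String.singleton c)).foldl (fun d x => d.insert x (d.getD x 0 + 1)) d := by
  induction ws generalizing d with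
  | nil => rfl
  | cons w ws ih =>
    rw [List.foldl_cons, ih, pvTallyChars, List.map_cons, List.flatten_cons,
      List.filter_append, List.map_append, List.foldl_append]

-- B's skip-set loop builds set((floating+locked) minus '_')
theorem pvSkipSet (cs : List Char) :
    cs.foldl (fun s c => if c == '_' then s else PySem.Set.add s c) PySem.Set.empty
      = PySem.Set.ofList (cs.filter (fun c => !(c == '_'))) := by
  rw [pvFoldl_if_skip, PySem.Set.ofList_eq_foldl]; rfl

theorem pvAB (word_list : List String) (floating_letters locked_letters : String)
    (remove_known : Bool) :
    calc_letter_frequency word_list floating_letters locked_letters remove_known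
      = calc_letter_frequency_alt word_list floating_letters locked_letters remove_known := by
  have h0 : (("" : String).toList) = [] := rfl
  have hU : (("_" : String).toList) = ['_'] := rfl
  cases remove_known with
  | false =>
    simp only [calc_letter_frequency, calc_letter_frequency_alt, Bool.false_eq_true, ite_false]
    rw [pvTallyWords, PySem.Dict.foldl_insert_getD_add_one_eq_counter,
      pvFoldl_append_toList, h0, List.nil_append]
    refine congrArg _ (congrArg _ (congrArg _ ?_))
    refine (List.filter_eq_self.mpr (fun c _ => ?_)).symm
    simp [PySem.Set.empty]
  | true =>
    simp only [calc_letter_frequency, calc_letter_frequency_alt, ite_true]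
    rw [pvTallyWords, PySem.Dict.foldl_insert_getD_add_one_eq_counter, pvSkipSet,
      pvFoldl_replace, pvFoldl_append_toList, h0, List.nil_append]
    refine congrArg _ (congrArg _ (congrArg _ (List.filter_congr (fun c _ => ?_))))
    rw [PySem.Str.toList_replace, hU, h0, pvReplace_single, pvPred_eq]

-- ===== VERDICT (by name: the statement is the Claim_ definition above) =====
theorem calc_letter_frequency_spec : Claim_equal_calc_letter_frequency := by
  intro word_list floating_letters locked_letters remove_known _
  exact pvAB word_list floating_letters locked_letters remove_known
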